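-- pv_equiv track=rewrite | github.com/HungIT0312/Smart-Parking | parking/ModelAI/lib_findcontours.py | check
-- ===== SOURCE A (Python) =====
-- def check(arr):
--     dem = 0
--     for i in range(0, len(arr)):
--
--         for k in range(i + 1, len(arr) - 1):
--             if arr[k] - arr[i] > 30 :
--                dem+=1
--
--     if dem > 0 :return 1
--     else :return 0
-- ===== SOURCE B (Python) =====
-- def check(arr):
--     if not arr:
--         return 0
--     mn = arr[0]
--     for x in arr[1:]:
--         if x - mn > 30:
--             return 1
--         if x < mn:
--             mn = x
--     return 0
-- ===== Notes on version B (the rewrite author's own statement) =====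
-- stated objective: faster
-- what changed: Replaced the quadratic all-pairs double loop with a single pass that tracks the prefix minimum and returns 1 as soon as some element exceeds it by more than 30.
-- intended difference: On arrays whose only pair differing by more than 30 involves the LAST element (A's inner range stops at len(arr)-1, an off-by-one, so the last element is never compared), A returns 0 while B returns 1, which is the intended answer for 'some later element exceeds an earlier one by more than 30'. — e.g. on check([0, 0, 40]): A returns 0, B returns 1
import Mathlib
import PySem

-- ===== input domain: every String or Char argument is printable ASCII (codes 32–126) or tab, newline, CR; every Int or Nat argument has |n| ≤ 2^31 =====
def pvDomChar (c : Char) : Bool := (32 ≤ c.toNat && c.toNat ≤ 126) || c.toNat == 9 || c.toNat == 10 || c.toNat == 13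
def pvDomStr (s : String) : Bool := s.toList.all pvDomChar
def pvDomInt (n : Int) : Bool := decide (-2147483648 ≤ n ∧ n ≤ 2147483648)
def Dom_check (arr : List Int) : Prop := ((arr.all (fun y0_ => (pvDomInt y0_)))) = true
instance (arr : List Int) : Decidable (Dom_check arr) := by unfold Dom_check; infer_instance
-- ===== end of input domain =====

-- B replaces A's all-pairs double loop by one pass tracking the prefix minimum (O(n) vs O(n^2)),
-- and examines the whole array where A's inner range stops one short of the end (see D_check below).

-- ===== PORT A =====
def check (arr : List Int) : Int :=
  let n : Int := arr.length
  let dem : Int :=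
    (PySem.List.pyRange 0 n 1).foldl (fun dem i =>
      (PySem.List.pyRange (i + 1) (n - 1) 1).foldl (fun dem k =>
        if PySem.List.pyGetD arr k 0 - PySem.List.pyGetD arr i 0 > 30 then dem + 1 else dem) dem) 0
  if dem > 0 then 1 else 0

-- ===== PORT B =====
def checkAltGo (mn : Int) : List Int → Int
  | [] => 0
  | x :: t => if x - mn > 30 then 1 else checkAltGo (if x < mn then x else mn) t

def check_alt (arr : List Int) : Int :=
  match arr with
  | [] => 0
  | x :: t => checkAltGo x t

-- ===== PRECONDITION & SPEC =====
-- On arrays whose only pair differing by more than 30 involves the LAST element, A returns 0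
-- (its inner range(i+1, len(arr)-1) never reaches the last element — an off-by-one) while B
-- returns 1, the intended answer for "some later element exceeds an earlier one by more than 30".
def D_check (arr : List Int) : Prop :=
  arr.dropLast.Pairwise (fun a b : Int => b - a ≤ 30) ∧
  ¬ arr.Pairwise (fun a b : Int => b - a ≤ 30)
instance (arr : List Int) : Decidable (D_check arr) := by unfold D_check; infer_instance

def Spec_check (arr : List Int) (out : Int) : Prop := ¬ D_check arr → out = check_alt arr
instance (arr : List Int) (out : Int) : Decidable (Spec_check arr out) := by unfold Spec_check; infer_instance

def pvDiffWitness_check : List Int := [0, 0, 40]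
def pvDiffWitnessOut_check : Int × Int := (0, 1)

-- ===== CLAIM (what is proved, stated in full; the proofs are below) =====
def Claim_unchanged_check : Prop := ∀ (arr : List Int), Dom_check arr → Spec_check arr (check arr)
def Claim_changed_check : Prop := Dom_check (pvDiffWitness_check) ∧ D_check (pvDiffWitness_check) ∧ check (pvDiffWitness_check) = pvDiffWitnessOut_check.1 ∧ check_alt (pvDiffWitness_check) = pvDiffWitnessOut_check.2 ∧ pvDiffWitnessOut_check.1 ≠ pvDiffWitnessOut_check.2
def Claim_exact_check : Prop := ∀ (arr : List Int), Dom_check arr → D_check arr → check arr ≠ check_alt arr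

-- ===== LEMMAS AND PROOFS =====

-- B's scan returns 0 exactly when the running minimum (seeded with mn) never gets exceeded by
-- more than 30, i.e. when mn :: t has no bad pair.
theorem checkAltGo_eq (t : List Int) : ∀ mn : Int,
    checkAltGo mn t = if (mn :: t).Pairwise (fun a b : Int => b - a ≤ 30) then 0 else 1 := by
  induction t with
  | nil => intro mn; simp [checkAltGo]
  | cons x t ih =>
    intro mn
    rw [checkAltGo]
    by_cases h : x - mn > 30
    · rw [if_pos h, if_neg]
      intro hp
      have := (List.pairwise_cons.mp hp).1 x (by simp)
      omega
    · rw [if_neg h, ih]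
      have hiff : ((if x < mn then x else mn) :: t).Pairwise (fun a b : Int => b - a ≤ 30) ↔
          (mn :: x :: t).Pairwise (fun a b : Int => b - a ≤ 30) := by
        simp only [List.pairwise_cons, List.mem_cons]
        constructor
        · rintro ⟨h1, h2⟩
          refine ⟨?_, fun b hb => ?_, h2⟩
          · rintro b (rfl | hb)
            · omega
            · have := h1 b hb; split_ifs at this <;> omega
          · have := h1 b hb; split_ifs at this <;> omega
        · rintro ⟨h1, h2, h3⟩
          refine ⟨fun b hb => ?_, h3⟩
          have hm := h1 b (Or.inr hb)
          have hx := h2 b hb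
          split_ifs <;> omega
      rw [if_congr hiff rfl rfl]

theorem check_alt_eq (arr : List Int) :
    check_alt arr = if arr.Pairwise (fun a b : Int => b - a ≤ 30) then 0 else 1 := by
  cases arr with
  | nil => simp [check_alt]
  | cons x t => rw [check_alt, checkAltGo_eq]

-- A's double loop counts the bad pairs among indices < length - 1, i.e. inside arr.dropLast.
theorem check_eq (arr : List Int) :
    check arr = if arr.dropLast.Pairwise (fun a b : Int => b - a ≤ 30) then 0 else 1 := by
  rw [check]
  have hcnt : ∀ (i d : Int),
      (PySem.List.pyRange (i + 1) ((arr.length : Int) - 1) 1).foldl (fun dem k =>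
        if PySem.List.pyGetD arr k 0 - PySem.List.pyGetD arr i 0 > 30 then dem + 1 else dem) d
      = d + ((PySem.List.pyRange (i + 1) ((arr.length : Int) - 1) 1).countP
              (fun k => decide (PySem.List.pyGetD arr k 0 - PySem.List.pyGetD arr i 0 > 30)) : Int) := by
    intro i d
    simpa using PySem.List.foldl_count_if
      (fun k => decide (PySem.List.pyGetD arr k 0 - PySem.List.pyGetD arr i 0 > 30))
      (PySem.List.pyRange (i + 1) ((arr.length : Int) - 1) 1) d
  simp only [hcnt]
  rw [PySem.List.foldl_add]
  simp only [zero_add]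
  have key : (0 < ((PySem.List.pyRange 0 (arr.length : Int) 1).map (fun i =>
        ((PySem.List.pyRange (i + 1) ((arr.length : Int) - 1) 1).countP
          (fun k => decide (PySem.List.pyGetD arr k 0 - PySem.List.pyGetD arr i 0 > 30)) : Int))).sum)
      ↔ ¬ arr.dropLast.Pairwise (fun a b : Int => b - a ≤ 30) := by
    have hmap : (PySem.List.pyRange 0 (arr.length : Int) 1).map (fun i =>
        ((PySem.List.pyRange (i + 1) ((arr.length : Int) - 1) 1).countP
          (fun k => decide (PySem.List.pyGetD arr k 0 - PySem.List.pyGetD arr i 0 > 30)) : Int))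
        = List.map Nat.cast ((PySem.List.pyRange 0 (arr.length : Int) 1).map (fun i =>
            (PySem.List.pyRange (i + 1) ((arr.length : Int) - 1) 1).countP
              (fun k => decide (PySem.List.pyGetD arr k 0 - PySem.List.pyGetD arr i 0 > 30)))) := by
      rw [List.map_map]; rfl
    rw [hmap, ← Nat.cast_list_sum, Int.natCast_pos, List.pairwise_iff_getElem]
    rw [Nat.pos_iff_ne_zero, Ne, List.sum_eq_zero_iff]
    push_neg
    have hlen : arr.dropLast.length = arr.length - 1 := List.length_dropLast
    constructor
    · rintro ⟨c, hc, hcne⟩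
      obtain ⟨i, hi, rfl⟩ := List.mem_map.mp hc
      have hi' := PySem.List.mem_pyRange_one.mp hi
      obtain ⟨k, hk, hkp⟩ := List.countP_pos_iff.mp (Nat.pos_of_ne_zero hcne)
      have hk' := PySem.List.mem_pyRange_one.mp hk
      have hkb : PySem.List.pyGetD arr k 0 - PySem.List.pyGetD arr i 0 > 30 := by
        simpa using hkp
      rw [PySem.List.pyGetD_eq_getElem arr 0 (by omega) (by omega),
          PySem.List.pyGetD_eq_getElem arr 0 (by omega) (by omega)] at hkb
      refine ⟨i.toNat, k.toNat, by omega, by omega, by omega, ?_⟩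
      rw [List.getElem_dropLast, List.getElem_dropLast]
      omega
    · rintro ⟨i, j, hi, hj, hij, hbad⟩
      refine ⟨((PySem.List.pyRange ((i : Int) + 1) ((arr.length : Int) - 1) 1).countP
          (fun k => decide (PySem.List.pyGetD arr k 0 - PySem.List.pyGetD arr (i : Int) 0 > 30))),
        List.mem_map.mpr ⟨(i : Int), PySem.List.mem_pyRange_one.mpr ⟨by omega, by omega⟩, rfl⟩, ?_⟩
      have hpos : 0 < (PySem.List.pyRange ((i : Int) + 1) ((arr.length : Int) - 1) 1).countP
          (fun k => decide (PySem.List.pyGetD arr k 0 - PySem.List.pyGetD arr (i : Int) 0 > 30)) := by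
        rw [List.countP_pos_iff]
        refine ⟨(j : Int), PySem.List.mem_pyRange_one.mpr ⟨by omega, by omega⟩, ?_⟩
        rw [List.getElem_dropLast, List.getElem_dropLast] at hbad
        simp only [decide_eq_true_eq]
        rw [PySem.List.pyGetD_eq_getElem arr 0 (by omega) (by omega),
            PySem.List.pyGetD_eq_getElem arr 0 (by omega) (by omega)]
        simp only [Int.toNat_natCast]
        omega
      omega
  by_cases hp : arr.dropLast.Pairwise (fun a b : Int => b - a ≤ 30)
  · rw [if_pos hp, if_neg]
    intro hpos
    exact (key.mp hpos) hp
  · rw [if_neg hp, if_pos (key.mpr hp)]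

-- ===== VERDICT (by name: the statement is the Claim_ definition above) =====
theorem check_spec : Claim_unchanged_check := by
  intro arr _ hnD
  rw [check_eq, check_alt_eq]
  by_cases hp : arr.Pairwise (fun a b : Int => b - a ≤ 30)
  · rw [if_pos hp, if_pos (hp.sublist (List.dropLast_sublist arr))]
  · rw [if_neg hp, if_neg]
    intro hdl
    exact hnD ⟨hdl, hp⟩

theorem check_changed : Claim_changed_check := by
  unfold Claim_changed_check; decide

theorem check_tight : Claim_exact_check := by
  intro arr _ hD
  rw [check_eq, check_alt_eq, if_pos hD.1, if_neg hD.2]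
  decide
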